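-- pv_equiv track=rewrite | github.com/mphpX/baekj | 프로그래머스/3/64064. 불량 사용자/불량 사용자.py | solution
-- ===== SOURCE A (Python) =====
-- def solution(user_id, banned_id):
--     sl= [[] for _ in range(9)]
--     for uid in user_id:
--         sl[len(uid)].append(uid)
--     candidate=[[] for _ in range(len(banned_id))]
--     for i in range(len(banned_id)):
--         bid= banned_id[i]
--         for uid in sl[len(bid)]:
--             no=0
--             for j in range(len(bid)):
--                 if(uid[j]==bid[j] or bid[j]=='*'):
--                     continue
--                 else:
--                     no=1
--                     break
--             if(no==0):
--                 candidate[i].append(uid)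
--     graph= dict()
--     for uid in user_id:
--         graph[uid]=0
--     cases= set()
--     def dfs(idx, picked):
--         if(idx==len(candidate)):
--             cases.add(tuple(sorted(picked)))
--             return
--         for ban in candidate[idx]:
--             if(graph[ban]==0):
--                 graph[ban]=1
--                 dfs(idx+1, picked+[ban])
--                 graph[ban]=0
--     dfs(0,[])
--     return len(cases)
-- ===== SOURCE B (Python) =====
-- def solution(user_id, banned_id):
--     # Same return value as A; B builds the product iteratively instead of recursive DFS with graph marking.
--     def matches(b, u):
--         return len(u) == len(b) and all(bc == '*' or uc == bc for uc, bc in zip(u, b))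
--
--     candidates = [[u for u in user_id if matches(b, u)] for b in banned_id]
--     combos = [[]]
--     for cand in candidates:
--         combos = [combo + [u] for combo in combos for u in cand if u not in combo]
--     cases = {tuple(sorted(c)) for c in combos}
--     return len(cases)
-- ===== Notes on version B (the rewrite author's own statement) =====
-- stated objective: simpler
-- what changed: Replaces A's length-bucket table plus recursive DFS with shared mutable graph-marking by a direct per-pattern wildcard filter and an iterative product build (a fold that extends partial combos, skipping reused users), collecting sorted tuples into a set.
-- crash fix: A raises IndexError whenever some user or banned id is longer than 8 characters (its bucket list has only 9 slots); B needs no bucket array and returns the ordinary count there. — e.g. on solution(["aaaaaaaaaa"], ["*"]): A raises IndexError, B returns 0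
import Mathlib
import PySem

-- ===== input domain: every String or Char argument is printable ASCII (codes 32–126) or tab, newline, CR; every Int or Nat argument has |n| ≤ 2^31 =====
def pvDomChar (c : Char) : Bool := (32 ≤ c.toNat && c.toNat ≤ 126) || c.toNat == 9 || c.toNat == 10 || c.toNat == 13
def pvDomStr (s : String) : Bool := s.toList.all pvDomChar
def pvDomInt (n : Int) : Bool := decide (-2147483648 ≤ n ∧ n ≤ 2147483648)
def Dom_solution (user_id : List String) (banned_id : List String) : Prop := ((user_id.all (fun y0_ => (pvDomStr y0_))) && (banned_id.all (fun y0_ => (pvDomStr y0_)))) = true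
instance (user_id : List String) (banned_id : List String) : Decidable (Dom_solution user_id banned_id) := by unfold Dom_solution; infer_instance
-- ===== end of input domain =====

-- B replaces A's recursive DFS with graph marking by an iterative product build; return value only (neither program mutates its arguments).

-- ===== PORT A =====
/-- A's inner character loop computing the `no` flag (`break` = stop recursing with 1).
    Exact for A's calls: `uid` comes from the bucket of `bid`'s length, so the lists have
    equal length and `uid[j]`/`bid[j]` never raise. -/
def noFlagA : List Char → List Char → Int
  | _, [] => 0
  | [], _ :: _ => 0
  | u :: us, b :: bs => if u == b || b == '*' then noFlagA us bs else 1

mutual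
/-- `dfs(idx, picked)`: recursion over the suffix of `candidate`, threading `(graph, cases)`. -/
def dfsA : List (List String) → PySem.Dict String Int → PySem.Set (List String) → List String →
    PySem.Dict String Int × PySem.Set (List String)
  | [], g, cs, picked => (g, PySem.Set.add cs (PySem.List.sorted picked (fun x => x) false))
  | c :: rest, g, cs, picked => dfsLoopA c rest g cs picked
/-- the `for ban in candidate[idx]` loop inside `dfs`: mark, recurse, unmark. -/
def dfsLoopA : List String → List (List String) → PySem.Dict String Int → PySem.Set (List String) → List String →
    PySem.Dict String Int × PySem.Set (List String)
  | [], _, g, cs, _ => (g, cs)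
  | ban :: bans, rest, g, cs, picked =>
    if PySem.Dict.getD g ban 0 == 0 then
      let st := dfsA rest (g.insert ban 1) cs (picked ++ [ban])
      dfsLoopA bans rest (st.1.insert ban 0) st.2 picked
    else
      dfsLoopA bans rest g cs picked
end

/-- port of A. `sl[len(uid)]` raises IndexError when a string is longer than 8 (Pre_ excludes
    those inputs); inside Pre_ the `set`/`getD` accesses below are in range, hence exact. -/
def solution (user_id : List String) (banned_id : List String) : Int :=
  let sl := user_id.foldl
    (fun sl uid => sl.set uid.toList.length ((sl.getD uid.toList.length []) ++ [uid]))
    (List.replicate 9 ([] : List String))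
  let candidate := banned_id.map (fun bid =>
    (sl.getD bid.toList.length []).foldl
      (fun acc uid => if noFlagA uid.toList bid.toList == 0 then acc ++ [uid] else acc) [])
  let graph := user_id.foldl (fun g uid => g.insert uid (0 : Int)) PySem.Dict.empty
  ((dfsA candidate graph PySem.Set.empty []).2.length : Int)

-- ===== PORT B =====
/-- B's `matches(b, u)`: equal length and every pattern position is `'*'` or equal. -/
def matchB (b u : List Char) : Bool :=
  (u.length == b.length) && ((u.zip b).all (fun p => p.2 == '*' || p.1 == p.2))

def solution_alt (user_id : List String) (banned_id : List String) : Int :=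
  let candidates := banned_id.map (fun b => user_id.filter (fun u => matchB b.toList u.toList))
  let combos := candidates.foldl
    (fun acc c => acc.flatMap (fun combo =>
      (c.filter (fun u => !combo.contains u)).map (fun u => combo ++ [u]))) [[]]
  let cases := PySem.Set.ofList (combos.map (fun c => PySem.List.sorted c (fun x => x) false))
  (cases.length : Int)

-- ===== PRECONDITION & SPEC =====
-- Pre_ excludes exactly the inputs where A raises IndexError: some id longer than 8 (sl has 9 buckets).
def Pre_solution (user_id : List String) (banned_id : List String) : Prop :=
  (∀ s ∈ user_id, s.toList.length ≤ 8) ∧ (∀ s ∈ banned_id, s.toList.length ≤ 8)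
instance (user_id : List String) (banned_id : List String) : Decidable (Pre_solution user_id banned_id) := by
  unfold Pre_solution; infer_instance
def pvWitness_solution : List String × List String := (["frodo", "fradi", "abc123"], ["fr*d*"])

-- A raises IndexError whenever some id (user or banned) is longer than 8 characters; B just counts (no bucket array) and returns the count.
def Raises_solution (user_id : List String) (banned_id : List String) : Prop :=
  (∃ s ∈ user_id, 9 ≤ s.toList.length) ∨ (∃ s ∈ banned_id, 9 ≤ s.toList.length)
instance (user_id : List String) (banned_id : List String) : Decidable (Raises_solution user_id banned_id) := by
  unfold Raises_solution; infer_instance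
def pvRaiseWitness_solution : List String × List String := (["aaaaaaaaaa"], ["*"])
def pvRaiseWitnessOut_solution : Int := 0

def Spec_solution (user_id : List String) (banned_id : List String) (out : Int) : Prop := out = solution_alt user_id banned_id
instance (user_id : List String) (banned_id : List String) (out : Int) : Decidable (Spec_solution user_id banned_id out) := by unfold Spec_solution; infer_instance

-- ===== CLAIM (what is proved, stated in full; the proofs are below) =====
def Claim_equal_solution : Prop := ∀ (user_id : List String) (banned_id : List String), Dom_solution user_id banned_id → Pre_solution user_id banned_id → Spec_solution user_id banned_id (solution user_id banned_id)
def Claim_raises_solution : Prop := (∀ (user_id : List String) (banned_id : List String), Dom_solution user_id banned_id → Raises_solution user_id banned_id → ¬ Pre_solution user_id banned_id) ∧ (Dom_solution (pvRaiseWitness_solution.1) (pvRaiseWitness_solution.2) ∧ Raises_solution (pvRaiseWitness_solution.1) (pvRaiseWitness_solution.2) ∧ solution_alt (pvRaiseWitness_solution.1) (pvRaiseWitness_solution.2) = pvRaiseWitnessOut_solution)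

-- ===== LEMMAS AND PROOFS =====

/-- proof-side spec of both enumerations: the valid extension sequences of `picked`,
    in the common (lexicographic) generation order. -/
def extL : List (List String) → List String → List (List String)
  | [], _ => [[]]
  | c :: rest, p =>
    (c.filter (fun u => !p.contains u)).flatMap (fun u => (extL rest (p ++ [u])).map (fun e => u :: e))

lemma noFlagA_eq_zero (u b : List Char) :
    (noFlagA u b == 0) = (u.zip b).all (fun p => p.2 == '*' || p.1 == p.2) := by
  induction u generalizing b with
  | nil => cases b <;> simp [noFlagA]
  | cons x xs ih =>
    cases b with
    | nil => simp [noFlagA]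
    | cons y ys =>
      show ((if x == y || y == '*' then noFlagA xs ys else 1) == 0) = _
      by_cases h : (x == y || y == '*') = true
      · have h' : (y == '*' || x == y) = true := by rw [Bool.or_comm]; exact h
        rw [if_pos h, ih]
        simp [List.zip_cons_cons, List.all_cons, h']
      · have h' : (y == '*' || x == y) = false := by rw [Bool.or_comm]; simpa using h
        rw [if_neg h]
        simp [List.zip_cons_cons, List.all_cons, h']

lemma bucket_getD (us : List String) (init : List (List String)) (hlen : init.length = 9)
    (h : ∀ u ∈ us, u.toList.length ≤ 8) (L : Nat) (hL : L ≤ 8) :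
    (us.foldl (fun sl u => sl.set u.toList.length ((sl.getD u.toList.length []) ++ [u])) init).getD L []
      = init.getD L [] ++ us.filter (fun u => u.toList.length == L) := by
  induction us generalizing init with
  | nil => simp
  | cons u us ih =>
    have hu : u.toList.length ≤ 8 := h u List.mem_cons_self
    have hset : ((init.set u.toList.length ((init.getD u.toList.length []) ++ [u])).getD L [])
        = if u.length = L then init.getD L [] ++ [u] else init.getD L [] := by
      simp only [List.getD_eq_getElem?_getD, List.getElem?_set]
      split
      · next he =>
        have hul : u.toList.length < init.length := by omega
        have he' : u.length = L := by simpa using he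
        rw [if_pos hul, he, if_pos he']
        rfl
      · next he => rw [if_neg (by simpa using he)]
    rw [List.foldl_cons, ih _ (by simp [hlen]) (fun v hv => h v (List.mem_cons_of_mem _ hv)), hset]
    by_cases he : u.length = L
    · simp [he, List.append_assoc]
    · simp [he]

lemma graph0_getD (user_id : List String) (d : PySem.Dict String Int)
    (hd : ∀ x, d.getD x 0 = 0) (x : String) :
    (user_id.foldl (fun g uid => g.insert uid (0 : Int)) d).getD x 0 = 0 := by
  induction user_id generalizing d with
  | nil => exact hd x
  | cons u us ih =>
    rw [List.foldl_cons]
    exact ih _ (fun y => by rw [PySem.Dict.getD_insert]; split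
                            · rfl
                            · exact hd y)

mutual
theorem dfsA_eq (cand : List (List String)) (g : PySem.Dict String Int)
    (cs : PySem.Set (List String)) (p : List String)
    (hg : ∀ x, (PySem.Dict.getD g x 0 == 0) = !p.contains x) :
    (∀ x, (dfsA cand g cs p).1.getD x 0 = g.getD x 0) ∧
      (dfsA cand g cs p).2
        = (extL cand p).foldl (fun s e => PySem.Set.add s (PySem.List.sorted (p ++ e) (fun x => x) false)) cs := by
  cases cand with
  | nil => refine ⟨fun x => ?_, ?_⟩ <;> simp [dfsA, extL]
  | cons c rest =>
    have h := dfsLoopA_eq c rest g cs p hg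
    rw [dfsA]
    exact ⟨h.1, by rw [h.2, extL]⟩
theorem dfsLoopA_eq (c : List String) (rest : List (List String)) (g : PySem.Dict String Int)
    (cs : PySem.Set (List String)) (p : List String)
    (hg : ∀ x, (PySem.Dict.getD g x 0 == 0) = !p.contains x) :
    (∀ x, (dfsLoopA c rest g cs p).1.getD x 0 = g.getD x 0) ∧
      (dfsLoopA c rest g cs p).2
        = ((c.filter (fun u => !p.contains u)).flatMap
            (fun u => (extL rest (p ++ [u])).map (fun e => u :: e))).foldl
            (fun s e => PySem.Set.add s (PySem.List.sorted (p ++ e) (fun x => x) false)) cs := by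
  cases c with
  | nil => refine ⟨fun x => ?_, ?_⟩ <;> simp [dfsLoopA]
  | cons ban bans =>
    rw [dfsLoopA, hg ban]
    by_cases hb : p.contains ban = true
    · have hbm : ban ∈ p := by simpa using hb
      rw [hb]
      simp only [Bool.not_true]
      rw [if_neg (by simp)]
      have h := dfsLoopA_eq bans rest g cs p hg
      refine ⟨h.1, ?_⟩
      rw [h.2]
      simp [hbm]
    · have hb' : p.contains ban = false := by simpa using hb
      rw [hb']
      simp only [Bool.not_false]
      rw [if_pos trivial]
      have hgban : PySem.Dict.getD g ban 0 = 0 := by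
        have := hg ban; rw [hb'] at this; simpa using this
      have hg1 : ∀ x, (PySem.Dict.getD (g.insert ban 1) x 0 == 0) = !(p ++ [ban]).contains x := by
        intro x
        rw [PySem.Dict.getD_insert]
        by_cases hx : x = ban
        · subst hx; simp
        · rw [if_neg hx]
          simp [hg x, hx]
      have hA := dfsA_eq rest (g.insert ban 1) cs (p ++ [ban]) hg1
      have hst1 : ∀ x, ((dfsA rest (g.insert ban 1) cs (p ++ [ban])).1.insert ban 0).getD x 0 = PySem.Dict.getD g x 0 := by
        intro x
        rw [PySem.Dict.getD_insert]
        by_cases hx : x = ban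
        · subst hx; rw [if_pos rfl, hgban]
        · rw [if_neg hx, hA.1 x, PySem.Dict.getD_insert, if_neg hx]
      have hg2 : ∀ x, (PySem.Dict.getD ((dfsA rest (g.insert ban 1) cs (p ++ [ban])).1.insert ban 0) x 0 == 0) = !p.contains x := by
        intro x; rw [hst1 x]; exact hg x
      have hloop := dfsLoopA_eq bans rest ((dfsA rest (g.insert ban 1) cs (p ++ [ban])).1.insert ban 0)
        (dfsA rest (g.insert ban 1) cs (p ++ [ban])).2 p hg2
      refine ⟨fun x => by rw [hloop.1 x, hst1 x], ?_⟩
      rw [hloop.2, hA.2]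
      simp only [List.filter_cons, hb', Bool.not_false, if_true,
        List.flatMap_cons, List.foldl_append, List.foldl_map]
      congr 1
      apply PySem.List.foldl_congr_mem
      intro acc e _
      congr 2
      simp [List.append_assoc]
end

lemma combos_eq (cands : List (List String)) (acc : List (List String)) :
    cands.foldl (fun acc c => acc.flatMap (fun combo =>
        (c.filter (fun u => !combo.contains u)).map (fun u => combo ++ [u]))) acc
      = acc.flatMap (fun p => (extL cands p).map (fun e => p ++ e)) := by
  induction cands generalizing acc with
  | nil => simp [extL]
  | cons c rest ih =>
    rw [List.foldl_cons, ih]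
    simp only [extL, List.flatMap_assoc, List.flatMap_map, List.map_flatMap, List.map_map,
      Function.comp_def, ← List.append_cons]

-- ===== VERDICT (by name: the statement is the Claim_ definition above) =====
lemma replicate9_getD (L : Nat) : (List.replicate 9 ([] : List String)).getD L [] = [] := by
  rw [List.getD_eq_getElem?_getD, List.getElem?_replicate]
  split <;> rfl

theorem solution_spec : Claim_equal_solution := by
  intro user_id banned_id _ hpre
  unfold Spec_solution
  simp only [solution, solution_alt]
  have hcand : banned_id.map (fun bid =>
      ((user_id.foldl (fun sl uid => sl.set uid.toList.length ((sl.getD uid.toList.length []) ++ [uid]))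
          (List.replicate 9 ([] : List String))).getD bid.toList.length []).foldl
        (fun acc uid => if noFlagA uid.toList bid.toList == 0 then acc ++ [uid] else acc) [])
      = banned_id.map (fun b => user_id.filter (fun u => matchB b.toList u.toList)) := by
    apply List.map_congr_left
    intro bid hbid
    have hlb : bid.toList.length ≤ 8 := hpre.2 bid hbid
    rw [PySem.List.foldl_append_if_eq_filter,
      bucket_getD user_id _ (by simp) hpre.1 _ hlb, replicate9_getD, List.nil_append,
      List.nil_append, List.filter_filter]
    apply List.filter_congr
    intro u hu
    simp only [matchB, noFlagA_eq_zero]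
    rw [Bool.and_comm]
  rw [hcand]
  have hg0 : ∀ x, (PySem.Dict.getD (user_id.foldl (fun g uid => g.insert uid (0 : Int)) PySem.Dict.empty) x 0 == 0)
      = !([] : List String).contains x := by
    intro x
    rw [graph0_getD user_id PySem.Dict.empty (fun y => by simp) x]
    simp
  rw [(dfsA_eq (banned_id.map (fun b => user_id.filter (fun u => matchB b.toList u.toList)))
      (user_id.foldl (fun g uid => g.insert uid (0 : Int)) PySem.Dict.empty)
      PySem.Set.empty [] hg0).2]
  rw [combos_eq]
  simp only [List.flatMap_cons, List.flatMap_nil, List.append_nil, List.nil_append]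
  rw [PySem.Set.ofList_eq_foldl, List.foldl_map]
  simp only [List.map_id']
  rfl

@[simp] theorem solution_raises : Claim_raises_solution := by
  unfold Claim_raises_solution
  refine ⟨?_, by decide⟩
  rintro user_id banned_id _ (⟨s, hs, hl⟩ | ⟨s, hs, hl⟩) ⟨h1, h2⟩
  · have := h1 s hs; omega
  · have := h2 s hs; omega
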